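-- pv_equiv track=rewrite | github.com/alimleahat/Air-Route-Assignment-Algorithm | statistics.py | resample_quarterly
-- ===== SOURCE A (Python) =====
-- def resample_quarterly(periods, totals):
--     # Group by quarters
--     quarterly_data = {}
--     for i in range(len(periods)):
--         year, month = periods[i].split('-')
--         month = int(month)
--         quarter = (month - 1) // 3 + 1  # Calculate quarter number
--         quarter_key = f"{year}-Q{quarter}"
--
--         if quarter_key not in quarterly_data:
--             quarterly_data[quarter_key] = 0
--         quarterly_data[quarter_key] += totals[i]
--
--     # Sort and separate keys and values
--     sorted_quarters = sorted(quarterly_data.keys())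
--     quarterly_values = [quarterly_data[q] for q in sorted_quarters]
--
--     return sorted_quarters, quarterly_values
-- ===== SOURCE B (Python) =====
-- def resample_quarterly(periods, totals):
--     # Dict-free: compute each row's quarter key, then sorted distinct keys,
--     # then one filtered sum per quarter.
--     keys = []
--     for p in periods:
--         year, month = p.split('-')
--         quarter = (int(month) - 1) // 3 + 1
--         keys.append(f"{year}-Q{quarter}")
--     sorted_quarters = sorted(set(keys))
--     quarterly_values = [sum(t for k, t in zip(keys, totals) if k == q)
--                         for q in sorted_quarters]
--     return sorted_quarters, quarterly_values
-- ===== Notes on version B (the rewrite author's own statement) =====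
-- stated objective: alternative
-- what changed: Replaces the mutable dict accumulation with a dict-free pipeline: compute each row's quarter key, take sorted(set(keys)) for the quarter list, and obtain each quarterly value as one filtered sum over zip(keys, totals); Pre_ excludes inputs where A raises (periods entries not of the form 'year-month' with an int month, or totals shorter than periods).
import Mathlib
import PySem

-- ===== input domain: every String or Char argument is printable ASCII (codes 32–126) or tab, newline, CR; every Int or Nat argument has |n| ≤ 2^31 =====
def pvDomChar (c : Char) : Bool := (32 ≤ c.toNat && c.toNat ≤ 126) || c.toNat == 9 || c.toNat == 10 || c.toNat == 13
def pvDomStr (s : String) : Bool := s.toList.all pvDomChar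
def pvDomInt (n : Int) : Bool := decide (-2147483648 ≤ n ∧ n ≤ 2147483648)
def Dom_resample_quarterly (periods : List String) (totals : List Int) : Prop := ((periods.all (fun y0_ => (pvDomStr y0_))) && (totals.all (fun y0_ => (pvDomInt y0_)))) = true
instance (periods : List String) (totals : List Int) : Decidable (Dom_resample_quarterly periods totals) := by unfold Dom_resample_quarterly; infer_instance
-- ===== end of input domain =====

-- B replaces A's mutable dict accumulation with a dict-free pipeline (per-row quarter keys,
-- sorted distinct keys, one filtered sum per quarter); same results, no speed claim.


-- ===== PORT A =====
-- A-side helper: A's grouping loop ('for i in range(len(periods)): … quarterly_data[quarter_key] += totals[i]')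
def pvDictA (periods : List String) (totals : List Int) : PySem.Dict String Int :=
  (PySem.List.pyRange 0 (periods.length : Int) 1).foldl (fun d i =>
    match (PySem.Str.split? (PySem.List.pyGetD periods i "") "-").getD [] with
    | [year, month] =>
      let m := (PySem.Int.ofStr? month).getD 0          -- int(month); Pre_ guarantees some
      let quarter := PySem.Int.floordiv (m - 1) 3 + 1
      let quarter_key := year ++ "-Q" ++ PySem.Int.toStr quarter
      let d := if d.contains quarter_key then d else d.insert quarter_key 0
      d.insert quarter_key (d.getD quarter_key 0 + PySem.List.pyGetD totals i 0)
    | _ => d                                            -- Python raises ValueError here; outside Pre_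
    ) PySem.Dict.empty

def resample_quarterly (periods : List String) (totals : List Int) : List String × List Int :=
  let quarterly_data := pvDictA periods totals
  let sorted_quarters := PySem.List.sorted quarterly_data.keys (fun q => q) false
  let quarterly_values := sorted_quarters.map (fun q => quarterly_data.getD q 0)
  (sorted_quarters, quarterly_values)

-- ===== PORT B =====
-- B-side helper: the quarter key of one period string
def pvQuarterKeyB (p : String) : String :=
  match (PySem.Str.split? p "-").getD [] with
  | [year, month] =>
      year ++ "-Q" ++ PySem.Int.toStr
        (PySem.Int.floordiv ((PySem.Int.ofStr? month).getD 0 - 1) 3 + 1)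
  | _ => ""                                             -- Python raises ValueError here; outside Pre_

def resample_quarterly_alt (periods : List String) (totals : List Int) : List String × List Int :=
  let keys := periods.map pvQuarterKeyB
  let sorted_quarters := PySem.List.sorted (PySem.Set.ofList keys) (fun q => q) false
  let quarterly_values := sorted_quarters.map (fun q =>
      (((keys.zip totals).filter (fun kt => kt.1 == q)).map (fun kt => kt.2)).sum)
  (sorted_quarters, quarterly_values)

-- ===== PRECONDITION & SPEC =====
-- Pre_ = exactly the inputs on which A returns: every period splits on '-' into exactly two
-- parts with an int()-parsable month part, and totals is at least as long as periods
-- (otherwise A raises ValueError resp. IndexError).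
def Pre_resample_quarterly (periods : List String) (totals : List Int) : Prop :=
  periods.length ≤ totals.length ∧
  ∀ p ∈ periods,
    ((PySem.Str.split? p "-").getD []).length = 2 ∧
    (PySem.Int.ofStr? (((PySem.Str.split? p "-").getD []).getD 1 "")).isSome = true
instance (periods : List String) (totals : List Int) : Decidable (Pre_resample_quarterly periods totals) := by unfold Pre_resample_quarterly; infer_instance

def pvWitness_resample_quarterly : List String × List Int := (["2020-01", "2020-05", "2020-02"], [3, 5, 4])

def Spec_resample_quarterly (periods : List String) (totals : List Int) (out : List String × List Int) : Prop := out = resample_quarterly_alt periods totals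
instance (periods : List String) (totals : List Int) (out : List String × List Int) : Decidable (Spec_resample_quarterly periods totals out) := by unfold Spec_resample_quarterly; infer_instance

-- ===== CLAIM (what is proved, stated in full; the proofs are below) =====
def Claim_equal_resample_quarterly : Prop := ∀ (periods : List String) (totals : List Int), Dom_resample_quarterly periods totals → Pre_resample_quarterly periods totals → Spec_resample_quarterly periods totals (resample_quarterly periods totals)

-- ===== LEMMAS AND PROOFS =====

-- canonical accumulation step both ports reduce to
def pvStep (d : PySem.Dict String Int) (p : String × Int) : PySem.Dict String Int :=
  d.insert p.1 (d.getD p.1 0 + p.2)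

lemma pv_getD_foldl_step (L : List (String × Int)) (d : PySem.Dict String Int) (k : String) :
    (L.foldl pvStep d).getD k 0
      = d.getD k 0 + ((L.filter (fun p => p.1 == k)).map (fun p => p.2)).sum := by
  induction L generalizing d with
  | nil => simp
  | cons p L ih =>
    simp only [List.foldl_cons, List.filter_cons, ih, pvStep]
    by_cases h : p.1 = k
    · simp [h, add_assoc]
    · simp [PySem.Dict.getD_insert, h, Ne.symm h]

-- A's grouping dict is the canonical fold of (quarter key, total) pairs
lemma pv_dictA_eq (periods : List String) (totals : List Int)
    (h1 : periods.length ≤ totals.length)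
    (hp : ∀ p ∈ periods,
      ((PySem.Str.split? p "-").getD []).length = 2) :
    pvDictA periods totals
      = ((periods.zip totals).map (fun kt => (pvQuarterKeyB kt.1, kt.2))).foldl
          pvStep PySem.Dict.empty := by
  have hZlen : (periods.zip totals).length = periods.length := by
    rw [List.length_zip]; omega
  unfold pvDictA
  have hcongr := PySem.List.foldl_congr_mem
    (PySem.List.pyRange 0 (periods.length : Int) 1)
    (fun d i =>
      match (PySem.Str.split? (PySem.List.pyGetD periods i "") "-").getD [] with
      | [year, month] =>
        let m := (PySem.Int.ofStr? month).getD 0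
        let quarter := PySem.Int.floordiv (m - 1) 3 + 1
        let quarter_key := year ++ "-Q" ++ PySem.Int.toStr quarter
        let d := if d.contains quarter_key then d else d.insert quarter_key 0
        d.insert quarter_key (d.getD quarter_key 0 + PySem.List.pyGetD totals i 0)
      | _ => d)
    (fun d i =>
      pvStep d ((fun kt => (pvQuarterKeyB kt.1, kt.2))
        (PySem.List.pyGetD (periods.zip totals) i ("", 0))))
    PySem.Dict.empty ?_
  · rw [hcongr]
    have hlen : (periods.length : Int) = PySem.List.len (periods.zip totals) := by
      simp [PySem.List.len, hZlen]
    rw [hlen,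
      PySem.List.foldl_pyRange_pyGetD (periods.zip totals) ("", 0)
        (fun d kt => pvStep d (pvQuarterKeyB kt.1, kt.2)) PySem.Dict.empty le_rfl,
      Int.toNat_zero, List.drop_zero, List.foldl_map]
  · intro d i hi
    rw [PySem.List.mem_pyRange_one] at hi
    beta_reduce
    have hilt : i.toNat < periods.length := by omega
    have hzlt : i.toNat < (periods.zip totals).length := by omega
    rw [PySem.List.pyGetD_eq_getElem periods "" hi.1 (by omega),
        PySem.List.pyGetD_eq_getElem totals 0 hi.1 (by omega),
        PySem.List.pyGetD_eq_getElem (periods.zip totals) ("", 0) hi.1 (by omega)]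
    rw [List.getElem_zip]
    have hmem : periods[i.toNat] ∈ periods := List.getElem_mem _
    have hsplit := hp _ hmem
    rcases hps : (PySem.Str.split? periods[i.toNat] "-").getD [] with _ | ⟨y, rest⟩
    · rw [hps] at hsplit; simp at hsplit
    rcases rest with _ | ⟨m, rest⟩
    · rw [hps] at hsplit; simp at hsplit
    rcases rest with _ | ⟨z, rest⟩
    · -- the real case: exactly two parts
      simp only [hps, pvStep, pvQuarterKeyB]
      set k := y ++ "-Q" ++ PySem.Int.toStr
          (PySem.Int.floordiv ((PySem.Int.ofStr? m).getD 0 - 1) 3 + 1) with hk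
      by_cases hc : d.contains k = true
      · rw [if_pos hc]
      · rw [if_neg hc, PySem.Dict.getD_insert_self, PySem.Dict.insert_insert_self,
          PySem.Dict.getD_of_not_contains _ _ (by simpa using hc), zero_add]
    · rw [hps] at hsplit; simp at hsplit

-- ===== VERDICT (by name: the statement is the Claim_ definition above) =====
theorem resample_quarterly_spec : Claim_equal_resample_quarterly := by
  intro periods totals _ hpre
  obtain ⟨h1, hp⟩ := hpre
  unfold Spec_resample_quarterly
  have hd := pv_dictA_eq periods totals h1 (fun p hpm => (hp p hpm).1)
  have hkeys : (pvDictA periods totals).keys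
      = PySem.Set.ofList (periods.map pvQuarterKeyB) := by
    rw [hd]
    have hk := PySem.Dict.keys_foldl_insert_key
      (ν := Int)
      ((periods.zip totals).map (fun kt => (pvQuarterKeyB kt.1, kt.2)))
      Prod.fst (fun d x => d.getD x.1 0 + x.2) PySem.Dict.empty
    have hmap : ((periods.zip totals).map (fun kt => (pvQuarterKeyB kt.1, kt.2))).map Prod.fst
        = periods.map pvQuarterKeyB := by
      rw [List.map_map]
      conv_rhs => rw [← List.map_fst_zip (l₂ := totals) h1, List.map_map]
      exact List.map_congr_left (fun kt _ => rfl)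
    rw [hmap] at hk
    exact hk
  have hzip : (periods.map pvQuarterKeyB).zip totals
      = (periods.zip totals).map (fun kt => (pvQuarterKeyB kt.1, kt.2)) := by
    rw [List.zip_map_left]
    exact List.map_congr_left (fun kt _ => by rcases kt with ⟨a, b⟩; rfl)
  have hval : ∀ q, (pvDictA periods totals).getD q 0
      = (((((periods.zip totals).map (fun kt => (pvQuarterKeyB kt.1, kt.2))).filter
            (fun kt => kt.1 == q)).map (fun kt => kt.2))).sum := by
    intro q
    rw [hd, pv_getD_foldl_step]
    simp
  show resample_quarterly periods totals = resample_quarterly_alt periods totals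
  simp only [resample_quarterly, resample_quarterly_alt, hkeys, hzip]
  exact Prod.ext rfl (List.map_congr_left (fun q _ => hval q))
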